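-- pv_equiv track=rewrite | github.com/Pinghie/linguistica_computazionale_2021_progetto | Programma1.py | Hapax1000
-- ===== SOURCE A (Python) =====
-- def Hapax1000(tokens): #Calcola il numero di Hapax sui primi 1000 token
--     tokens1000 = tokens[0:1000] #Prendo in considerazione solo i primi 1000 token del corpus
--     vocabolario1000 = list(set(tokens1000)) #Calcolo il vocabolario dei primi 1000 token (non considero i token ripetuti)
--     nHapax = 0
--     for tok in vocabolario1000:
--         freq = tokens.count(tok)
--         if(freq == 1):
--             nHapax+=1
--
--     return nHapax
-- ===== SOURCE B (Python) =====
-- def Hapax1000(tokens):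
--     freq = {}
--     for t in tokens:
--         freq[t] = freq.get(t, 0) + 1
--     hapax = {t for t, n in freq.items() if n == 1}
--     return len(hapax & set(tokens[0:1000]))
-- ===== Notes on version B (the rewrite author's own statement) =====
-- stated objective: faster
-- what changed: Replaces A's per-vocabulary-entry rescans of the whole token list (tokens.count inside a loop) with one frequency table built in a single pass, then a set intersection of the globally-unique tokens with the first-1000 token set.
import Mathlib
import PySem

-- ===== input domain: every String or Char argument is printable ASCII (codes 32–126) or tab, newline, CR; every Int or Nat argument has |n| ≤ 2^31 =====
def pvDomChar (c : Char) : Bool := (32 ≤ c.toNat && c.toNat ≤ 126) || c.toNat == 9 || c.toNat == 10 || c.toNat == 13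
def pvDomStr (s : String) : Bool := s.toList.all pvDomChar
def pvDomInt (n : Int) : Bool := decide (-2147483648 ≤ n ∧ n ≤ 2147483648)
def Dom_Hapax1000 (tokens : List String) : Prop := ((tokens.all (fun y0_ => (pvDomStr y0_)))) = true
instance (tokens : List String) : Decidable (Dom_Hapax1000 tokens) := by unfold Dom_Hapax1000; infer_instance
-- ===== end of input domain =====

-- B builds one frequency table and intersects the global-hapax set with the first-1000 token set,
-- instead of A's repeated tokens.count scan per vocabulary entry.


-- ===== PORT A =====
def Hapax1000 (tokens : List String) : Int :=
  let tokens1000 := PySem.List.slice tokens (some 0) (some 1000)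
  let vocabolario1000 : List String := PySem.Set.ofList tokens1000
  vocabolario1000.foldl (fun nHapax tok =>
    let freq := PySem.List.count tokens tok
    if freq == 1 then nHapax + 1 else nHapax) 0

-- ===== PORT B =====
def Hapax1000_alt (tokens : List String) : Int :=
  let freq := tokens.foldl (fun d t => d.modify t 0 (· + 1)) (PySem.Dict.empty : PySem.Dict String Int)
  let hapax : PySem.Set String :=
    PySem.Set.ofList ((freq.items.filter (fun p => p.2 == 1)).map (·.1))
  PySem.Set.len (PySem.Set.inter hapax (PySem.Set.ofList (PySem.List.slice tokens (some 0) (some 1000))))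

-- ===== PRECONDITION & SPEC =====
def Spec_Hapax1000 (tokens : List String) (out : Int) : Prop := out = Hapax1000_alt tokens
instance (tokens : List String) (out : Int) : Decidable (Spec_Hapax1000 tokens out) := by unfold Spec_Hapax1000; infer_instance

-- ===== CLAIM (what is proved, stated in full; the proofs are below) =====
def Claim_equal_Hapax1000 : Prop := ∀ (tokens : List String), Dom_Hapax1000 tokens → Spec_Hapax1000 tokens (Hapax1000 tokens)

-- ===== LEMMAS AND PROOFS =====
theorem hapax_eq (tokens : List String) : Hapax1000 tokens = Hapax1000_alt tokens := by
  have hslice : PySem.List.slice tokens (some 0) (some 1000) = tokens.take 1000 := by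
    simpa using PySem.List.slice_natCast tokens 0 1000
  set S : List String := PySem.Set.ofList (tokens.take 1000) with hS
  set L : List String := PySem.Set.ofList tokens with hL
  have hA : Hapax1000 tokens = ((S.countP (fun tok => PySem.List.count tokens tok == 1) : Int)) := by
    simp only [Hapax1000, hslice, ← hS]
    rw [PySem.List.foldl_count_if (p := fun tok => PySem.List.count tokens tok == 1)]
    simp
  have hfilt : ((PySem.Dict.counter tokens).items.filter (fun p => p.2 == 1)).map (·.1)
      = L.filter (fun k => ((List.count k tokens : Int) == 1)) := by
    rw [PySem.Dict.items_counter]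
    rw [List.filter_map, List.map_map]
    simp only [Function.comp_def]
    exact List.map_id _
  have hB : Hapax1000_alt tokens =
      (((L.filter (fun k => ((List.count k tokens : Int) == 1))).filter
        (fun x => PySem.Set.contains S x)).length : Int) := by
    simp only [Hapax1000_alt, ← PySem.Dict.counter_eq_foldl, hslice, ← hS, hfilt]
    rw [PySem.Set.ofList_eq_self_of_nodup _ ((PySem.Set.nodup_ofList tokens).filter _)]
    rfl
  rw [hA, hB]
  congr 1
  have hperm : (S.filter (fun tok => PySem.List.count tokens tok == 1)).Perm
      ((L.filter (fun k => ((List.count k tokens : Int) == 1))).filter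
        (fun x => PySem.Set.contains S x)) := by
    rw [List.perm_ext_iff_of_nodup ((PySem.Set.nodup_ofList _).filter _)
      (((PySem.Set.nodup_ofList _).filter _).filter _)]
    intro a
    simp only [List.mem_filter, PySem.Set.contains_iff, hS, PySem.Set.mem_ofList]
    constructor
    · rintro ⟨ha, hc⟩
      have hmem : a ∈ tokens := List.mem_of_mem_take ha
      refine ⟨⟨hmem, ?_⟩, by simpa [PySem.Set.mem_ofList] using ha⟩
      simpa [PySem.List.count, Int.ofNat_inj] using hc
    · rintro ⟨⟨_, hc⟩, ha⟩
      refine ⟨by simpa [PySem.Set.mem_ofList] using ha, ?_⟩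
      simpa [PySem.List.count, Int.ofNat_inj] using hc
  rw [List.countP_eq_length_filter]
  exact hperm.length_eq

-- ===== VERDICT (by name: the statement is the Claim_ definition above) =====
theorem Hapax1000_spec : Claim_equal_Hapax1000 := by
  intro tokens _
  unfold Spec_Hapax1000
  exact hapax_eq tokens
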